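-- pv_equiv track=rewrite | github.com/novadecore/Solana-Arbitrage-Bot | crypto_arbitrage_detector/algorithms/bellman_ford_algorithm.py | _are_same_cycle
-- ===== SOURCE A (Python) =====
-- from typing import List, Optional
--
-- def _are_same_cycle(path1: List[str], path2: List[str]) -> bool:
--     """
--     Check if two paths represent the same cycle (considering rotations)
--     """
--     if len(path1) != len(path2):
--         return False
--
--     # Remove last duplicate node for comparison
--     cycle1 = path1[:-1] if path1[0] == path1[-1] else path1
--     cycle2 = path2[:-1] if path2[0] == path2[-1] else path2
--
--     if len(cycle1) != len(cycle2):
--         return False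
--
--     # Check all rotations
--     for i in range(len(cycle1)):
--         rotated = cycle1[i:] + cycle1[:i]
--         # Check reverse
--         if rotated == cycle2 or rotated == cycle2[::-1]:
--             return True
--
--     return False
-- ===== SOURCE B (Python) =====
-- def _are_same_cycle(path1, path2):
--     """Doubling + substring search: cycle2 (and its reverse), joined with a
--     separator, is searched as a substring of cycle1 doubled.  A path is treated
--     as closed (repeated endpoint stripped) only when it has more than one node."""
--     if len(path1) != len(path2):
--         return False
--
--     cycle1 = path1[:-1] if len(path1) > 1 and path1[0] == path1[-1] else path1
--     cycle2 = path2[:-1] if len(path2) > 1 and path2[0] == path2[-1] else path2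
--
--     if len(cycle1) != len(cycle2):
--         return False
--
--     sep = '\x00'
--
--     def enc(c):
--         return sep + sep.join(c) + sep
--
--     doubled = sep + sep.join(cycle1 + cycle1) + sep
--     return enc(cycle2) in doubled or enc(cycle2[::-1]) in doubled
-- ===== Notes on version B (the rewrite author's own statement) =====
-- stated objective: faster
-- what changed: B joins each cycle with a separator character and tests cycle2 (and its reverse) as a substring of cycle1 doubled, instead of building and comparing every rotation of cycle1; it also strips the repeated endpoint only from paths with more than one node.
-- intended difference: On identical single-node paths such as (['a'],['a']) A strips the node (path[0]==path[-1]) leaving an empty cycle, so its rotation loop runs zero times and A returns False even though a path compared with itself is the same cycle; B does not strip single-node paths and returns True, the intended value. — e.g. on _are_same_cycle(["a"], ["a"]): A returns false, B returns true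
import Mathlib
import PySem

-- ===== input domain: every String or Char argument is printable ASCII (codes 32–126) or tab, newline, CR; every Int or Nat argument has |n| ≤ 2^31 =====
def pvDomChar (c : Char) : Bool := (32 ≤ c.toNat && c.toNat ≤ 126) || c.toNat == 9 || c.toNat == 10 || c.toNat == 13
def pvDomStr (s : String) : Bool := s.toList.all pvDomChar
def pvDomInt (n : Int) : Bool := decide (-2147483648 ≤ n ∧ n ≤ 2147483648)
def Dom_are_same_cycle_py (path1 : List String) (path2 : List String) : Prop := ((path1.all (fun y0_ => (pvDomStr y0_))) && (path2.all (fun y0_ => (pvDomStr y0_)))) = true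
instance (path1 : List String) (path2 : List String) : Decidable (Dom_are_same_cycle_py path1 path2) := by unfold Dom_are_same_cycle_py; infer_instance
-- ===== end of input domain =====

-- B tests cycle2 (and its reverse), joined with a separator character, as a substring of
-- cycle1 doubled, instead of comparing every rotation of cycle1; B strips the repeated
-- endpoint only from paths with more than one node (see the D_ block for the one corner
-- where that changes the answer).


-- ===== PORT A =====
-- c[i:] + c[:i]  (A builds rotations with this very expression)
def pyRotAt (c : List String) (i : Int) : List String :=
  PySem.List.slice c (some i) none ++ PySem.List.slice c none (some i)

-- A's strip: path[:-1] if path[0] == path[-1] else path  (A raises on [], outside Pre_)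
def stripA (p : List String) : List String :=
  if PySem.List.pyGet? p 0 == PySem.List.pyGet? p (-1) then PySem.List.slice p none (some (-1)) else p

def are_same_cycle_py (path1 : List String) (path2 : List String) : Bool :=
  if path1.length ≠ path2.length then false
  else
    let cycle1 := stripA path1
    let cycle2 := stripA path2
    if cycle1.length ≠ cycle2.length then false
    else
      -- for i in range(len(cycle1)): if rotated == cycle2 or rotated == cycle2[::-1]: return True
      -- (cycle2[::-1] is cycle2.reverse, exact by PySem.List.slice?_none_none_neg_one)
      (PySem.List.pyRange 0 cycle1.length 1).any (fun i =>
        pyRotAt cycle1 i == cycle2 || pyRotAt cycle1 i == cycle2.reverse)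

-- ===== PORT B =====
-- B's strip: path[:-1] if len(path) > 1 and path[0] == path[-1] else path
def stripB (p : List String) : List String :=
  if 1 < p.length && (PySem.List.pyGet? p 0 == PySem.List.pyGet? p (-1)) then PySem.List.slice p none (some (-1)) else p

def pySep : String := "\x00"

-- enc(c) = sep + sep.join(c) + sep
def pyEncode (c : List String) : String := pySep ++ PySem.Str.join pySep c ++ pySep

def are_same_cycle_py_alt (path1 : List String) (path2 : List String) : Bool :=
  if path1.length ≠ path2.length then false
  else
    let cycle1 := stripB path1
    let cycle2 := stripB path2
    if cycle1.length ≠ cycle2.length then false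
    else
      -- doubled = sep + sep.join(cycle1 + cycle1) + sep; return enc(cycle2) in doubled or enc(cycle2[::-1]) in doubled
      let doubled := pySep ++ PySem.Str.join pySep (cycle1 ++ cycle1) ++ pySep
      PySem.Str.isIn (pyEncode cycle2) doubled || PySem.Str.isIn (pyEncode cycle2.reverse) doubled

-- ===== PRECONDITION & SPEC =====
-- Pre_ excludes only (path1, path2) both empty, where A raises IndexError at path1[0].
def Pre_are_same_cycle_py (path1 : List String) (path2 : List String) : Prop :=
  ¬ (path1 = [] ∧ path2 = [])
instance (path1 : List String) (path2 : List String) : Decidable (Pre_are_same_cycle_py path1 path2) := by unfold Pre_are_same_cycle_py; infer_instance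

def pvWitness_are_same_cycle_py : List String × List String := (["a", "b"], ["b", "a"])

-- On identical single-node paths A strips the node (path[0]==path[-1]) leaving an empty
-- cycle, so its rotation loop runs zero times and A returns False even though a path
-- compared with itself is the same cycle; B does not strip single-node paths and returns
-- True, the intended value.
def D_are_same_cycle_py (path1 : List String) (path2 : List String) : Prop :=
  path1.tail = [] ∧ path1 ≠ [] ∧ path1 = path2
instance (path1 : List String) (path2 : List String) : Decidable (D_are_same_cycle_py path1 path2) := by unfold D_are_same_cycle_py; infer_instance

def Spec_are_same_cycle_py (path1 : List String) (path2 : List String) (out : Bool) : Prop := ¬ D_are_same_cycle_py path1 path2 → out = are_same_cycle_py_alt path1 path2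
instance (path1 : List String) (path2 : List String) (out : Bool) : Decidable (Spec_are_same_cycle_py path1 path2 out) := by unfold Spec_are_same_cycle_py; infer_instance

def pvDiffWitness_are_same_cycle_py : List String × List String := (["a"], ["a"])
def pvDiffWitnessOut_are_same_cycle_py : Bool × Bool := (false, true)

-- ===== CLAIM (what is proved, stated in full; the proofs are below) =====
def Claim_unchanged_are_same_cycle_py : Prop := ∀ (path1 : List String) (path2 : List String), Dom_are_same_cycle_py path1 path2 → Pre_are_same_cycle_py path1 path2 → Spec_are_same_cycle_py path1 path2 (are_same_cycle_py path1 path2)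
def Claim_changed_are_same_cycle_py : Prop := Dom_are_same_cycle_py (pvDiffWitness_are_same_cycle_py.1) (pvDiffWitness_are_same_cycle_py.2) ∧ Pre_are_same_cycle_py (pvDiffWitness_are_same_cycle_py.1) (pvDiffWitness_are_same_cycle_py.2) ∧ D_are_same_cycle_py (pvDiffWitness_are_same_cycle_py.1) (pvDiffWitness_are_same_cycle_py.2) ∧ are_same_cycle_py (pvDiffWitness_are_same_cycle_py.1) (pvDiffWitness_are_same_cycle_py.2) = pvDiffWitnessOut_are_same_cycle_py.1 ∧ are_same_cycle_py_alt (pvDiffWitness_are_same_cycle_py.1) (pvDiffWitness_are_same_cycle_py.2) = pvDiffWitnessOut_are_same_cycle_py.2 ∧ pvDiffWitnessOut_are_same_cycle_py.1 ≠ pvDiffWitnessOut_are_same_cycle_py.2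
def Claim_exact_are_same_cycle_py : Prop := ∀ (path1 : List String) (path2 : List String), Dom_are_same_cycle_py path1 path2 → Pre_are_same_cycle_py path1 path2 → D_are_same_cycle_py path1 path2 → are_same_cycle_py path1 path2 ≠ are_same_cycle_py_alt path1 path2

-- ===== LEMMAS AND PROOFS =====

def sepC : Char := Char.ofNat 0

-- encoding at the character level: each piece followed by one separator
def Ech (w : List (List Char)) : List Char := w.flatMap (fun u => u ++ [sepC])

theorem Ech_nil : Ech [] = [] := rfl

theorem Ech_cons (v : List Char) (w : List (List Char)) :
    Ech (v :: w) = v ++ sepC :: Ech w := by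
  simp [Ech]

theorem Ech_append (a b : List (List Char)) : Ech (a ++ b) = Ech a ++ Ech b := by
  simp [Ech]

theorem pySep_toList : pySep.toList = [sepC] := by decide

theorem join_concat : ∀ (w : List (List Char)), w ≠ [] →
    PySem.Chars.join [sepC] w ++ [sepC] = Ech w := by
  intro w
  induction w with
  | nil => intro h; exact absurd rfl h
  | cons v w' ih =>
    intro _
    cases w' with
    | nil => simp [PySem.Chars.join_singleton, Ech]
    | cons a b =>
      rw [PySem.Chars.join_cons_cons, Ech_cons, ← ih (by simp)]
      simp

theorem encode_toList (c : List String) (hc : c ≠ []) :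
    (pySep ++ PySem.Str.join pySep c ++ pySep).toList = sepC :: Ech (c.map String.toList) := by
  have hm : c.map String.toList ≠ [] := by simpa using hc
  simp only [String.toList_append, PySem.Str.toList_join, pySep_toList]
  rw [List.append_assoc, join_concat _ hm]
  rfl

-- every occurrence of the separator in v ++ sep :: r₁ (v separator-free) is either the
-- shown one or lies inside r₁
theorem splitsep : ∀ (v s r₁ r₂ : List Char), sepC ∉ v →
    v ++ sepC :: r₁ = s ++ sepC :: r₂ →
    (s = v ∧ r₂ = r₁) ∨ (∃ u, s = v ++ sepC :: u ∧ r₁ = u ++ sepC :: r₂) := by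
  intro v
  induction v with
  | nil =>
    intro s r₁ r₂ _ h
    cases s with
    | nil =>
      simp only [List.nil_append, List.cons.injEq] at h
      exact Or.inl ⟨rfl, h.2.symm⟩
    | cons c s' =>
      simp only [List.nil_append, List.cons_append, List.cons.injEq] at h
      exact Or.inr ⟨s', by rw [← h.1]; simp, h.2⟩
  | cons c v' ih =>
    intro s r₁ r₂ hfree h
    cases s with
    | nil =>
      simp only [List.cons_append, List.nil_append, List.cons.injEq] at h
      exact absurd (h.1 ▸ List.mem_cons_self) hfree
    | cons d s' =>
      simp only [List.cons_append, List.cons.injEq] at h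
      obtain ⟨rfl, h2⟩ := h
      rcases ih s' r₁ r₂ (fun hm => hfree (List.mem_cons_of_mem _ hm)) h2 with ⟨rfl, hr⟩ | ⟨u, rfl, hr⟩
      · exact Or.inl ⟨rfl, hr⟩
      · exact Or.inr ⟨u, by simp, hr⟩

theorem eqhead {y v a b : List Char} (hy : sepC ∉ y) (hv : sepC ∉ v)
    (h : y ++ sepC :: a = v ++ sepC :: b) : y = v ∧ a = b := by
  rcases splitsep y v a b hy h with ⟨rfl, hr⟩ | ⟨u, hu, _⟩
  · exact ⟨rfl, hr.symm⟩
  · exact absurd (hu ▸ (List.mem_append.mpr (Or.inr List.mem_cons_self))) hv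

-- every separator occurrence in Ech w is at a piece boundary
theorem align' : ∀ (w : List (List Char)), (∀ u ∈ w, sepC ∉ u) → ∀ s r,
    Ech w = s ++ sepC :: r → ∃ w1 w2, w = w1 ++ w2 ∧ r = Ech w2 := by
  intro w
  induction w with
  | nil =>
    intro _ s r h
    rw [Ech_nil] at h
    exact absurd h.symm (List.append_ne_nil_of_right_ne_nil s (by simp))
  | cons v w' ih =>
    intro hfree s r h
    rw [Ech_cons] at h
    rcases splitsep v s (Ech w') r (hfree v List.mem_cons_self) h with ⟨hs, hr⟩ | ⟨u, rfl, hw⟩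
    · exact ⟨[v], w', by simp, hr⟩
    · obtain ⟨w1, w2, rfl, hr⟩ := ih (fun u hu => hfree u (List.mem_cons_of_mem _ hu)) u r hw
      exact ⟨v :: w1, w2, by simp, hr⟩

theorem align (w : List (List Char)) (hfree : ∀ u ∈ w, sepC ∉ u) (s r : List Char)
    (h : sepC :: Ech w = s ++ sepC :: r) : ∃ w1 w2, w = w1 ++ w2 ∧ r = Ech w2 := by
  cases s with
  | nil =>
    simp only [List.nil_append, List.cons.injEq] at h
    exact ⟨[], w, rfl, h.2.symm⟩
  | cons c s' =>
    simp only [List.cons_append, List.cons.injEq] at h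
    exact align' w hfree s' r h.2

-- a piece-encoding that is a prefix of another decodes to a list prefix
theorem pref : ∀ (ys : List (List Char)), (∀ u ∈ ys, sepC ∉ u) →
    ∀ (w : List (List Char)), (∀ u ∈ w, sepC ∉ u) → ∀ t,
    Ech ys ++ t = Ech w → ∃ w', w = ys ++ w' ∧ t = Ech w' := by
  intro ys
  induction ys with
  | nil => intro _ w _ t h; exact ⟨w, rfl, by simpa [Ech_nil] using h⟩
  | cons y ys' ih =>
    intro hfree w hw t h
    cases w with
    | nil =>
      rw [Ech_cons, Ech_nil] at h
      exact absurd h (by simp)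
    | cons v w' =>
      rw [Ech_cons, Ech_cons, List.append_assoc, List.cons_append] at h
      obtain ⟨rfl, h2⟩ := eqhead (hfree y List.mem_cons_self) (hw v List.mem_cons_self) h
      obtain ⟨w'', rfl, ht⟩ := ih (fun u hu => hfree u (List.mem_cons_of_mem _ hu)) w'
        (fun u hu => hw u (List.mem_cons_of_mem _ hu)) t h2
      exact ⟨w'', by simp, ht⟩

theorem ech_ends : ∀ (w : List (List Char)), w ≠ [] → ∃ L, Ech w = L ++ [sepC] := by
  intro w
  induction w with
  | nil => intro h; exact absurd rfl h
  | cons v w' ih =>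
    intro _
    cases w' with
    | nil => exact ⟨v, by simp [Ech]⟩
    | cons a b =>
      obtain ⟨L, hL⟩ := ih (by simp)
      exact ⟨v ++ sepC :: L, by rw [Ech_cons, hL]; simp⟩

theorem rot_take {α : Type} (xs : List α) (k : Nat) (hk : k ≤ xs.length) :
    ((xs ++ xs).drop k).take xs.length = xs.rotate k := by
  rw [List.rotate_eq_drop_append_take hk, List.drop_append_of_le_length hk,
    List.take_append, List.take_of_length_le (by rw [List.length_drop]; omega)]
  congr 1
  rw [List.length_drop]
  congr 1
  omega

-- the heart of B: encoded cycle2 is a substring of encoded doubled cycle1 iff rotation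
theorem main_infix (xs ys : List (List Char)) (hx : xs ≠ []) (hlen : xs.length = ys.length)
    (hfx : ∀ u ∈ xs, sepC ∉ u) (hfy : ∀ u ∈ ys, sepC ∉ u) :
    ((sepC :: Ech ys) <:+: (sepC :: (Ech xs ++ Ech xs))) ↔ xs.IsRotated ys := by
  constructor
  · rintro ⟨s, t, h⟩
    have h' : sepC :: Ech (xs ++ xs) = s ++ sepC :: (Ech ys ++ t) := by
      rw [Ech_append]
      rw [← h]
      simp
    have hfxx : ∀ u ∈ xs ++ xs, sepC ∉ u := by
      intro u hu
      rcases List.mem_append.mp hu with h1 | h1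
      · exact hfx u h1
      · exact hfx u h1
    obtain ⟨w1, w2, hww, hr⟩ := align (xs ++ xs) hfxx s (Ech ys ++ t) h'
    obtain ⟨w', rfl, _⟩ := pref ys hfy w2 (fun u hu => hfxx u (hww ▸ List.mem_append.mpr (Or.inr hu))) t hr
    have hk : w1.length ≤ xs.length := by
      have := congrArg List.length hww
      simp at this
      omega
    have hdrop : (xs ++ xs).drop w1.length = ys ++ w' := by
      rw [hww, List.drop_left]
    have hys : ((xs ++ xs).drop w1.length).take xs.length = ys := by
      rw [hdrop, hlen, List.take_left]
    rw [rot_take xs w1.length hk] at hys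
    exact ⟨w1.length, hys⟩
  · intro h
    obtain ⟨k, hk, hrot⟩ := List.isRotated_iff_mod.mp h
    have hys : ys = xs.drop k ++ xs.take k := by
      rw [← hrot, List.rotate_eq_drop_append_take hk]
    have hxs : Ech xs = Ech (xs.take k) ++ Ech (xs.drop k) := by
      rw [← Ech_append, List.take_append_drop]
    by_cases htk : xs.take k = []
    · have hk0 : xs.drop k = xs := by
        rcases List.take_eq_nil_iff.mp htk with h0 | h0
        · rw [h0, List.drop_zero]
        · exact absurd h0 hx
      refine ⟨[], Ech xs, ?_⟩
      rw [hys, htk, hk0]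
      simp
    · obtain ⟨L, hL⟩ := ech_ends (xs.take k) htk
      refine ⟨sepC :: L, Ech (xs.drop k), ?_⟩
      rw [hys, Ech_append, hxs, hL]
      simp
-- sep-free facts from the domain
theorem dom_sepfree {s : String} (h : pvDomStr s = true) : sepC ∉ s.toList := by
  intro hm
  have hall := List.all_eq_true.mp h _ hm
  have : pvDomChar sepC = false := by decide
  rw [this] at hall
  exact Bool.false_ne_true hall

theorem toList_injective : Function.Injective String.toList :=
  fun _ _ h => String.toList_inj.mp h

theorem isRotated_map_toList_iff (xs ys : List String) :
    (xs.map String.toList).IsRotated (ys.map String.toList) ↔ xs.IsRotated ys := by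
  constructor
  · rintro ⟨k, h⟩
    rw [← List.map_rotate] at h
    exact ⟨k, List.map_injective_iff.mpr toList_injective h⟩
  · rintro ⟨k, h⟩
    exact ⟨k, by rw [← List.map_rotate, h]⟩

-- B's boolean characterized (string level)
theorem bexpr_iff (c1 c2 : List String) (h1 : c1 ≠ []) (hlen : c1.length = c2.length)
    (hf1 : ∀ u ∈ c1, sepC ∉ u.toList) (hf2 : ∀ u ∈ c2, sepC ∉ u.toList) :
    (PySem.Str.isIn (pyEncode c2) (pySep ++ PySem.Str.join pySep (c1 ++ c1) ++ pySep)
      || PySem.Str.isIn (pyEncode c2.reverse) (pySep ++ PySem.Str.join pySep (c1 ++ c1) ++ pySep)) = true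
    ↔ (c1.IsRotated c2 ∨ c1.IsRotated c2.reverse) := by
  have h2 : c2 ≠ [] := by
    intro h
    rw [h] at hlen
    exact h1 (List.length_eq_zero_iff.mp (by simpa using hlen))
  have h2r : c2.reverse ≠ [] := by simpa using h2
  have h11 : c1 ++ c1 ≠ [] := by
    intro h
    exact h1 (List.append_eq_nil_iff.mp h).1
  have hd : (pySep ++ PySem.Str.join pySep (c1 ++ c1) ++ pySep).toList
      = sepC :: (Ech (c1.map String.toList) ++ Ech (c1.map String.toList)) := by
    rw [encode_toList (c1 ++ c1) h11, List.map_append, Ech_append]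
  have he2 : (pyEncode c2).toList = sepC :: Ech (c2.map String.toList) := encode_toList c2 h2
  have he2r : (pyEncode c2.reverse).toList = sepC :: Ech ((c2.map String.toList).reverse) := by
    rw [pyEncode, encode_toList c2.reverse h2r, List.map_reverse]
  have hfm1 : ∀ u ∈ c1.map String.toList, sepC ∉ u := by
    rintro u hu
    obtain ⟨v, hv, rfl⟩ := List.mem_map.mp hu
    exact hf1 v hv
  have hfm2 : ∀ u ∈ c2.map String.toList, sepC ∉ u := by
    rintro u hu
    obtain ⟨v, hv, rfl⟩ := List.mem_map.mp hu
    exact hf2 v hv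
  have hfm2r : ∀ u ∈ (c2.map String.toList).reverse, sepC ∉ u := by
    intro u hu
    exact hfm2 u (List.mem_reverse.mp hu)
  have hm1 : c1.map String.toList ≠ [] := by simpa using h1
  have hml : (c1.map String.toList).length = (c2.map String.toList).length := by
    simpa using hlen
  have hmlr : (c1.map String.toList).length = ((c2.map String.toList).reverse).length := by
    simpa using hlen
  rw [Bool.or_eq_true, PySem.Str.isIn_eq, PySem.Str.isIn_eq, he2, he2r, hd,
    PySem.Chars.isIn_iff_infix, PySem.Chars.isIn_iff_infix,
    main_infix _ _ hm1 hml hfm1 hfm2, main_infix _ _ hm1 hmlr hfm1 hfm2r,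
    isRotated_map_toList_iff, ← List.map_reverse, isRotated_map_toList_iff]

-- A's loop characterized (as in the previous sections: rotations over pyRange)
theorem pyRotAt_eq_rotate (c : List String) (i : Int) (h0 : 0 ≤ i) (h : i < (c.length : Int)) :
    pyRotAt c i = c.rotate i.toNat := by
  unfold pyRotAt
  rw [PySem.List.slice_from c h0, PySem.List.slice_to c h0,
    List.rotate_eq_drop_append_take (by omega)]

theorem exists_rot_iff (c x : List String) (hc : c ≠ []) :
    (∃ i, (0 ≤ i ∧ i < (c.length : Int)) ∧ pyRotAt c i = x) ↔ c.IsRotated x := by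
  constructor
  · rintro ⟨i, ⟨h0, h1⟩, rfl⟩
    exact ⟨i.toNat, (pyRotAt_eq_rotate c i h0 h1).symm⟩
  · intro h
    obtain ⟨n, hn, rfl⟩ := List.isRotated_iff_mod.mp h
    rcases lt_or_eq_of_le hn with hlt | rfl
    · exact ⟨(n : Int), ⟨by omega, by exact_mod_cast hlt⟩,
        by rw [pyRotAt_eq_rotate c n (by omega) (by exact_mod_cast hlt)]; simp⟩
    · refine ⟨0, ⟨le_refl _, by simpa using List.length_pos_iff.mpr hc⟩, ?_⟩
      rw [pyRotAt_eq_rotate c 0 (le_refl _) (by simpa using List.length_pos_iff.mpr hc)]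
      simp [List.rotate_length]

theorem anyRot_eq_true_iff (c1 c2 : List String) (hc1 : c1 ≠ []) :
    ((PySem.List.pyRange 0 c1.length 1).any (fun i =>
        pyRotAt c1 i == c2 || pyRotAt c1 i == c2.reverse)) = true ↔
      (c1.IsRotated c2 ∨ c1.IsRotated c2.reverse) := by
  rw [List.any_eq_true]
  rw [← exists_rot_iff c1 c2 hc1, ← exists_rot_iff c1 c2.reverse hc1]
  constructor
  · rintro ⟨i, hi, hor⟩
    rw [PySem.List.mem_pyRange_one] at hi
    rcases Bool.or_eq_true_iff.mp hor with h | h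
    · exact Or.inl ⟨i, hi, by simpa using h⟩
    · exact Or.inr ⟨i, hi, by simpa using h⟩
  · rintro (⟨i, hi, he⟩ | ⟨i, hi, he⟩)
    · exact ⟨i, PySem.List.mem_pyRange_one.mpr hi, by simp [he]⟩
    · exact ⟨i, PySem.List.mem_pyRange_one.mpr hi, by simp [he]⟩

theorem stripB_eq_stripA (p : List String) (hp : 1 < p.length) : stripB p = stripA p := by
  unfold stripA stripB
  simp [hp]

theorem stripA_length_ge (p : List String) : p.length - 1 ≤ (stripA p).length := by
  unfold stripA
  rw [PySem.List.slice_to_neg_one]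
  split
  · simp [List.length_dropLast]
  · omega

theorem mem_stripA {p : List String} {u : String} (h : u ∈ stripA p) : u ∈ p := by
  unfold stripA at h
  rw [PySem.List.slice_to_neg_one] at h
  split at h
  · exact (List.dropLast_sublist p).mem h
  · exact h

theorem singleton_vals_A (s t : String) : are_same_cycle_py [s] [t] = false := by
  simp [are_same_cycle_py, stripA, PySem.List.pyGet?, PySem.List.pyIdx?,
    PySem.List.slice_to_neg_one]

theorem alt_singleton (s t : String) (hs : sepC ∉ s.toList) (ht : sepC ∉ t.toList) :
    are_same_cycle_py_alt [s] [t] = (s == t) := by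
  have hstrip : ∀ u : String, stripB [u] = [u] := by
    intro u; simp [stripB]
  have hlen : ¬(([s] : List String).length ≠ ([t] : List String).length) := by simp
  simp only [are_same_cycle_py_alt, hstrip]
  rw [if_neg hlen, if_neg hlen, Bool.eq_iff_iff, beq_iff_eq]
  rw [bexpr_iff [s] [t] (by simp) (by simp)
    (by intro u hu; rw [List.mem_singleton.mp hu]; exact hs)
    (by intro u hu; rw [List.mem_singleton.mp hu]; exact ht)]
  constructor
  · rintro (h | h)
    · simpa using List.perm_singleton.mp h.perm
    · have hp : ([s] : List String).Perm [t] := by simpa using h.perm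
      simpa using List.perm_singleton.mp hp
  · rintro rfl
    exact Or.inl (List.IsRotated.refl _)

theorem main_equiv : ∀ (path1 path2 : List String), Dom_are_same_cycle_py path1 path2 →
    Pre_are_same_cycle_py path1 path2 → ¬ D_are_same_cycle_py path1 path2 →
    are_same_cycle_py path1 path2 = are_same_cycle_py_alt path1 path2 := by
  intro p1 p2 hdom hpre hD
  have hdom' := hdom
  unfold Dom_are_same_cycle_py at hdom'
  rw [Bool.and_eq_true] at hdom'
  have hall1 : ∀ s ∈ p1, sepC ∉ s.toList := fun s hs =>
    dom_sepfree (List.all_eq_true.mp hdom'.1 s hs)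
  have hall2 : ∀ s ∈ p2, sepC ∉ s.toList := fun s hs =>
    dom_sepfree (List.all_eq_true.mp hdom'.2 s hs)
  by_cases hlen : p1.length = p2.length
  · rcases Nat.lt_or_ge p1.length 2 with hlt | hge
    · interval_cases h : p1.length
      · obtain rfl := List.length_eq_zero_iff.mp h
        obtain rfl := List.length_eq_zero_iff.mp (hlen ▸ h).symm
        exact absurd ⟨rfl, rfl⟩ hpre
      · obtain ⟨s, rfl⟩ := List.length_eq_one_iff.mp h
        obtain ⟨t, rfl⟩ := List.length_eq_one_iff.mp (hlen ▸ h).symm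
        have hst : s ≠ t := by
          intro he
          exact hD ⟨rfl, by simp, by rw [he]⟩
        rw [singleton_vals_A,
          alt_singleton s t (hall1 s (by simp)) (hall2 t (by simp))]
        simp [hst]
    · have h1 : 1 < p1.length := hge
      have h2 : 1 < p2.length := hlen ▸ hge
      simp only [are_same_cycle_py, are_same_cycle_py_alt]
      rw [if_neg (not_not_intro hlen), if_neg (not_not_intro hlen)]
      rw [stripB_eq_stripA p1 h1, stripB_eq_stripA p2 h2]
      by_cases hlc : (stripA p1).length = (stripA p2).length
      · rw [if_neg (not_not_intro hlc), if_neg (not_not_intro hlc)]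
        have hc1 : stripA p1 ≠ [] := by
          have := stripA_length_ge p1
          intro h; rw [h] at this; simp at this; omega
        rw [Bool.eq_iff_iff, anyRot_eq_true_iff (stripA p1) (stripA p2) hc1]
        rw [bexpr_iff (stripA p1) (stripA p2) hc1 hlc
          (fun u hu => hall1 u (mem_stripA hu))
          (fun u hu => hall2 u (mem_stripA hu))]
      · rw [if_pos hlc, if_pos hlc]
  · simp only [are_same_cycle_py, are_same_cycle_py_alt]
    rw [if_pos hlen, if_pos hlen]

-- ===== VERDICT (by name: the statement is the Claim_ definition above) =====
theorem are_same_cycle_py_spec : Claim_unchanged_are_same_cycle_py := by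
  intro p1 p2 hdom hpre hD
  exact main_equiv p1 p2 hdom hpre hD

theorem are_same_cycle_py_changed : Claim_changed_are_same_cycle_py := by
  unfold Claim_changed_are_same_cycle_py; decide

theorem are_same_cycle_py_tight : Claim_exact_are_same_cycle_py := by
  intro p1 p2 hdom _ hD
  obtain ⟨ht, hne, heq⟩ := hD
  subst heq
  obtain ⟨s, rfl⟩ : ∃ s, p1 = [s] := by
    cases p1 with
    | nil => exact absurd rfl hne
    | cons a l =>
      cases l with
      | nil => exact ⟨a, rfl⟩
      | cons b m => simp at ht
  have hs : sepC ∉ s.toList := by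
    unfold Dom_are_same_cycle_py at hdom
    rw [Bool.and_eq_true] at hdom
    exact dom_sepfree (List.all_eq_true.mp hdom.1 s (by simp))
  rw [singleton_vals_A, alt_singleton s s hs hs]
  simp
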